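-- pv_equiv track=rewrite | github.com/Dileep2896/reveria | backend/services/multi_voice_tts.py | assign_voices
-- ===== SOURCE A (Python) =====
-- VOICE_POOLS = {
--     "man":   ["Charon", "Fenrir", "Orus"],
--     "woman": ["Aoede", "Leda", "Zephyr"],
--     "boy":   ["Puck"],
--     "girl":  ["Zephyr"],
-- }
--
-- def assign_voices(
--     genders: dict[str, str], narrator_voice: str
-- ) -> dict[str, str]:
--     """Assign a unique Gemini voice to each character based on gender.
--
--     Cycles through the gender pool, skipping the narrator voice to ensure
--     characters always sound different from the narrator.
--     """
--     assignments: dict[str, str] = {}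
--     pool_idx: dict[str, int] = {"man": 0, "woman": 0, "boy": 0, "girl": 0}
--
--     for name, gender in genders.items():
--         pool = [v for v in VOICE_POOLS[gender] if v != narrator_voice]
--         if not pool:
--             pool = VOICE_POOLS[gender]  # fallback if narrator uses all options
--         voice = pool[pool_idx[gender] % len(pool)]
--         pool_idx[gender] += 1
--         assignments[name] = voice
--
--     return assignments
-- ===== SOURCE B (Python) =====
-- VOICE_POOLS = {
--     "man":   ["Charon", "Fenrir", "Orus"],
--     "woman": ["Aoede", "Leda", "Zephyr"],
--     "boy":   ["Puck"],
--     "girl":  ["Zephyr"],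
-- }
--
-- def assign_voices(genders: dict[str, str], narrator_voice: str) -> dict[str, str]:
--     """Assign a unique Gemini voice to each character based on gender.
--
--     One-time setup builds each gender's narrator-free pool (falling back to the
--     full pool when the narrator uses every option); per character we then just
--     pop from a per-gender queue that is refilled from its pool when exhausted.
--     """
--     pools: dict[str, list[str]] = {}
--     for g, base in VOICE_POOLS.items():
--         filtered = [v for v in base if v != narrator_voice]
--         pools[g] = filtered if filtered else base
--     remaining: dict[str, list[str]] = {g: [] for g in pools}
--
--     assignments: dict[str, str] = {}
--     for name, gender in genders.items():
--         if not remaining[gender]: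
--             remaining[gender] = list(pools[gender])
--         assignments[name] = remaining[gender].pop(0)
--     return assignments
-- ===== Notes on version B (the rewrite author's own statement) =====
-- stated objective: idiomatic
-- what changed: B hoists the narrator filter/fallback out of the per-character loop into a one-time per-gender pool table and replaces the integer counter + modulo indexing with per-gender queues that are popped and refilled (a hand-rolled cycle iterator).
import Mathlib
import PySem

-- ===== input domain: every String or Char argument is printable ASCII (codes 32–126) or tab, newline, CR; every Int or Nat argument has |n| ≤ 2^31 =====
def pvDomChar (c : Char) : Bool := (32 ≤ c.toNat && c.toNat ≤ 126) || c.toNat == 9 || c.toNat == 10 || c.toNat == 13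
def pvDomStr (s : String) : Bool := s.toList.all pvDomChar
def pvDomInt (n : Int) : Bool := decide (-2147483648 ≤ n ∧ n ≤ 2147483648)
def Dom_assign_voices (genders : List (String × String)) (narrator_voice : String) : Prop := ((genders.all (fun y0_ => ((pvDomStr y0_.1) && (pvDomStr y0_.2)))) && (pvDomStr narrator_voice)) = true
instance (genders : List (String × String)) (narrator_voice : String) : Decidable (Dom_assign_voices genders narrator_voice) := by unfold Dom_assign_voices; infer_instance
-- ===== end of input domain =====

-- B builds the per-gender narrator-free pools once and cycles per-gender queues (pop + refill)
-- instead of re-filtering the pool and doing counter-modulo indexing per character (objective: idiomatic).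


-- module constant VOICE_POOLS (shared by both Pythons)
def pvVoicePools : List (String × List String) :=
  [("man", ["Charon", "Fenrir", "Orus"]),
   ("woman", ["Aoede", "Leda", "Zephyr"]),
   ("boy", ["Puck"]),
   ("girl", ["Zephyr"])]

-- ===== PORT A =====
-- loop body of A: rebuild the filtered pool, index it with counter % len, bump the counter
def pvStepA (nv : String) (st : PySem.Dict String String × PySem.Dict String Int)
    (p : String × String) : PySem.Dict String String × PySem.Dict String Int :=
  let base := (PySem.Dict.ofList pvVoicePools).getD p.2 []   -- VOICE_POOLS[gender]; KeyError excluded by Pre_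
  let f := base.filter (fun v => v ≠ nv)
  let pool := if f = [] then base else f
  -- pool[pool_idx[gender] % len(pool)]; in range since pool ≠ [] under Pre_, so the "" default is never used
  let voice := (PySem.List.pyGet? pool (PySem.Int.mod (st.2.getD p.2 0) (pool.length : Int))).getD ""
  (st.1.insert p.1 voice, st.2.insert p.2 (st.2.getD p.2 0 + 1))

def assign_voices (genders : List (String × String)) (narrator_voice : String) : List (String × String) :=
  (genders.foldl (pvStepA narrator_voice)
    (PySem.Dict.empty, PySem.Dict.ofList [("man", (0 : Int)), ("woman", 0), ("boy", 0), ("girl", 0)])).1.items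

-- ===== PORT B =====
-- one-time setup: each gender's narrator-free pool, with the full pool as fallback
def pvPoolsB (nv : String) : PySem.Dict String (List String) :=
  (PySem.Dict.ofList pvVoicePools).items.foldl
    (fun d p =>
      let filtered := p.2.filter (fun v => v ≠ nv)
      d.insert p.1 (if filtered = [] then p.2 else filtered))
    PySem.Dict.empty

-- loop body of B: pop from the gender's queue, refilling it from its pool when empty
def pvStepB (nv : String) (st : PySem.Dict String String × PySem.Dict String (List String))
    (p : String × String) : PySem.Dict String String × PySem.Dict String (List String) :=
  let cur0 := st.2.getD p.2 []   -- remaining[gender]; KeyError excluded by Pre_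
  let cur := if cur0 = [] then (pvPoolsB nv).getD p.2 [] else cur0
  match cur with
  | [] => st   -- unreachable under Pre_: every gender pool is nonempty, so pop(0) cannot fail
  | v :: rest => (st.1.insert p.1 v, st.2.insert p.2 rest)

def assign_voices_alt (genders : List (String × String)) (narrator_voice : String) : List (String × String) :=
  let remaining0 := PySem.Dict.ofList ((pvPoolsB narrator_voice).keys.map (fun g => (g, ([] : List String))))
  (genders.foldl (pvStepB narrator_voice) (PySem.Dict.empty, remaining0)).1.items

-- ===== PRECONDITION & SPEC =====
-- Pre_ excludes exactly the inputs where a character's gender is not one of the four pool keys: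
-- there Python A raises KeyError (VOICE_POOLS[gender]), and Python B raises KeyError too.
def Pre_assign_voices (genders : List (String × String)) (narrator_voice : String) : Prop :=
  ∀ p ∈ genders, p.2 = "man" ∨ p.2 = "woman" ∨ p.2 = "boy" ∨ p.2 = "girl"
instance (genders : List (String × String)) (narrator_voice : String) : Decidable (Pre_assign_voices genders narrator_voice) := by unfold Pre_assign_voices; infer_instance

def pvWitness_assign_voices : (List (String × String)) × String :=
  ([("alice", "woman"), ("bob", "man"), ("carol", "woman"), ("dan", "man")], "Aoede")

def Spec_assign_voices (genders : List (String × String)) (narrator_voice : String) (out : List (String × String)) : Prop := out = assign_voices_alt genders narrator_voice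
instance (genders : List (String × String)) (narrator_voice : String) (out : List (String × String)) : Decidable (Spec_assign_voices genders narrator_voice out) := by unfold Spec_assign_voices; infer_instance

-- ===== CLAIM (what is proved, stated in full; the proofs are below) =====
def Claim_equal_assign_voices : Prop := ∀ (genders : List (String × String)) (narrator_voice : String), Dom_assign_voices genders narrator_voice → Pre_assign_voices genders narrator_voice → Spec_assign_voices genders narrator_voice (assign_voices genders narrator_voice)

-- ===== LEMMAS AND PROOFS =====

-- the effective pool A recomputes each iteration (and B tabulates once)
def pvPool (nv g : String) : List String :=
  let base := (PySem.Dict.ofList pvVoicePools).getD g []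
  let f := base.filter (fun v => v ≠ nv)
  if f = [] then base else f

def pvFour : List String := ["man", "woman", "boy", "girl"]

lemma pvPool_ne_nil (nv g : String) (hg : g ∈ pvFour) : pvPool nv g ≠ [] := by
  simp only [pvFour, List.mem_cons, List.not_mem_nil, or_false] at hg
  rcases hg with h | h | h | h <;> subst h <;>
    (simp only [pvPool]; split) <;> first | decide | assumption

lemma pvPoolsB_getD (nv g : String) (hg : g ∈ pvFour) :
    (pvPoolsB nv).getD g [] = pvPool nv g := by
  simp only [pvFour, List.mem_cons, List.not_mem_nil, or_false] at hg
  have hrw : pvPoolsB nv =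
      ((((PySem.Dict.empty.insert "man"
        (if ["Charon", "Fenrir", "Orus"].filter (fun v => v ≠ nv) = []
          then ["Charon", "Fenrir", "Orus"] else ["Charon", "Fenrir", "Orus"].filter (fun v => v ≠ nv))).insert "woman"
        (if ["Aoede", "Leda", "Zephyr"].filter (fun v => v ≠ nv) = []
          then ["Aoede", "Leda", "Zephyr"] else ["Aoede", "Leda", "Zephyr"].filter (fun v => v ≠ nv))).insert "boy"
        (if ["Puck"].filter (fun v => v ≠ nv) = []
          then ["Puck"] else ["Puck"].filter (fun v => v ≠ nv))).insert "girl"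
        (if ["Zephyr"].filter (fun v => v ≠ nv) = []
          then ["Zephyr"] else ["Zephyr"].filter (fun v => v ≠ nv))) := rfl
  rcases hg with h | h | h | h <;> subst h <;> rw [hrw]
  · rw [PySem.Dict.getD_insert_of_ne _ _ _ (by decide : ("man" : String) ≠ "girl"),
      PySem.Dict.getD_insert_of_ne _ _ _ (by decide : ("man" : String) ≠ "boy"),
      PySem.Dict.getD_insert_of_ne _ _ _ (by decide : ("man" : String) ≠ "woman"),
      PySem.Dict.getD_insert_self]
    rfl
  · rw [PySem.Dict.getD_insert_of_ne _ _ _ (by decide : ("woman" : String) ≠ "girl"),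
      PySem.Dict.getD_insert_of_ne _ _ _ (by decide : ("woman" : String) ≠ "boy"),
      PySem.Dict.getD_insert_self]
    rfl
  · rw [PySem.Dict.getD_insert_of_ne _ _ _ (by decide : ("boy" : String) ≠ "girl"),
      PySem.Dict.getD_insert_self]
    rfl
  · rw [PySem.Dict.getD_insert_self]
    rfl

lemma pvPoolsB_keys (nv : String) : (pvPoolsB nv).keys = pvFour := by
  show (((((PySem.Dict.empty : PySem.Dict String (List String)).insert "man" _).insert
      "woman" _).insert "boy" _).insert "girl" _).keys = _
  simp [pvFour, PySem.Dict.keys_insert_of_not_contains, PySem.Dict.contains_insert,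
    PySem.Dict.keys_empty]

-- the coupling invariant between A's counters and B's queues
def pvInv (nv : String) (idx : PySem.Dict String Int) (rem : PySem.Dict String (List String)) : Prop :=
  ∀ g ∈ pvFour, ∃ n r : Nat,
    idx.getD g 0 = (n : Int) ∧
    rem.getD g [] = (pvPool nv g).drop r ∧
    r ≤ (pvPool nv g).length ∧
    r % (pvPool nv g).length = n % (pvPool nv g).length

lemma pv_fold_eq (nv : String) : ∀ (gs : List (String × String))
    (asg : PySem.Dict String String) (idx : PySem.Dict String Int)
    (rem : PySem.Dict String (List String)),
    (∀ p ∈ gs, p.2 ∈ pvFour) → pvInv nv idx rem →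
    (gs.foldl (pvStepA nv) (asg, idx)).1 = (gs.foldl (pvStepB nv) (asg, rem)).1 := by
  intro gs
  induction gs with
  | nil => intro asg idx rem _ _; rfl
  | cons p gs ih =>
    intro asg idx rem hmem hinv
    have hp2 : p.2 ∈ pvFour := hmem p (List.mem_cons_self)
    obtain ⟨n, r, hn, hr, hrle, hmod⟩ := hinv p.2 hp2
    have hPne : pvPool nv p.2 ≠ [] := pvPool_ne_nil nv p.2 hp2
    have hlen : 0 < (pvPool nv p.2).length := List.length_pos_iff.mpr hPne
    -- A's step
    have hA : pvStepA nv (asg, idx) p =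
        (asg.insert p.1 ((pvPool nv p.2).getD (n % (pvPool nv p.2).length) ""),
         idx.insert p.2 ((n : Int) + 1)) := by
      simp only [pvStepA, pvPool, hn, PySem.Int.mod_natCast, PySem.List.pyGet?_natCast,
        List.getD_eq_getElem?_getD]
    -- B's step, by cases on whether the queue is empty
    by_cases hdrop : (pvPool nv p.2).drop r = []
    · -- queue exhausted: refill from the pool, pop its head
      have hrlen : r = (pvPool nv p.2).length := by
        have := List.drop_eq_nil_iff.mp hdrop
        omega
      have hn0 : n % (pvPool nv p.2).length = 0 := by
        rw [← hmod, hrlen, Nat.mod_self]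
      have hhead : pvPool nv p.2 =
          (pvPool nv p.2)[0]'hlen :: (pvPool nv p.2).drop 1 := by
        simpa using List.drop_eq_getElem_cons hlen
      have hB : pvStepB nv (asg, rem) p =
          (asg.insert p.1 ((pvPool nv p.2)[0]'hlen),
           rem.insert p.2 ((pvPool nv p.2).drop 1)) := by
        simp only [pvStepB, hr, hdrop, ite_true, pvPoolsB_getD nv p.2 hp2]
        conv_lhs => rw [hhead]
      have hveq : (pvPool nv p.2).getD (n % (pvPool nv p.2).length) "" =
          (pvPool nv p.2)[0]'hlen := by
        rw [hn0]; simp [List.getD_eq_getElem?_getD, List.getElem?_eq_getElem hlen]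
      rw [List.foldl_cons, List.foldl_cons, hA, hB, hveq]
      apply ih _ _ _ (fun q hq => hmem q (List.mem_cons_of_mem p hq))
      intro g hg
      by_cases hgp : g = p.2
      · subst hgp
        refine ⟨n + 1, 1, ?_, ?_, hlen, ?_⟩
        · rw [PySem.Dict.getD_insert_self]; push_cast; ring
        · rw [PySem.Dict.getD_insert_self]
        · rw [Nat.add_mod, hn0, Nat.zero_add, Nat.mod_mod]
      · obtain ⟨n', r', h1, h2, h3, h4⟩ := hinv g hg
        exact ⟨n', r', by rwa [PySem.Dict.getD_insert_of_ne _ _ _ hgp],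
          by rwa [PySem.Dict.getD_insert_of_ne _ _ _ hgp], h3, h4⟩
    · -- queue still has entries: pop its head
      have hrlt : r < (pvPool nv p.2).length := by
        rcases Nat.lt_or_ge r (pvPool nv p.2).length with h | h
        · exact h
        · exact absurd (List.drop_eq_nil_iff.mpr h) hdrop
      have hreq : r = n % (pvPool nv p.2).length := by
        rw [← hmod, Nat.mod_eq_of_lt hrlt]
      have hB : pvStepB nv (asg, rem) p =
          (asg.insert p.1 ((pvPool nv p.2)[r]'hrlt),
           rem.insert p.2 ((pvPool nv p.2).drop (r + 1))) := by
        simp only [pvStepB, hr, if_neg hdrop]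
        conv_lhs => rw [List.drop_eq_getElem_cons hrlt]
      have hveq : (pvPool nv p.2).getD (n % (pvPool nv p.2).length) "" =
          (pvPool nv p.2)[r]'hrlt := by
        rw [← hreq]; simp [List.getD_eq_getElem?_getD, List.getElem?_eq_getElem hrlt]
      rw [List.foldl_cons, List.foldl_cons, hA, hB, hveq]
      apply ih _ _ _ (fun q hq => hmem q (List.mem_cons_of_mem p hq))
      intro g hg
      by_cases hgp : g = p.2
      · subst hgp
        refine ⟨n + 1, r + 1, ?_, ?_, hrlt, ?_⟩
        · rw [PySem.Dict.getD_insert_self]; push_cast; ring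
        · rw [PySem.Dict.getD_insert_self]
        · rw [Nat.add_mod r, hmod, ← Nat.add_mod]
      · obtain ⟨n', r', h1, h2, h3, h4⟩ := hinv g hg
        exact ⟨n', r', by rwa [PySem.Dict.getD_insert_of_ne _ _ _ hgp],
          by rwa [PySem.Dict.getD_insert_of_ne _ _ _ hgp], h3, h4⟩

-- ===== VERDICT (by name: the statement is the Claim_ definition above) =====
theorem assign_voices_spec : Claim_equal_assign_voices := by
  intro gs nv _ hpre
  unfold Spec_assign_voices assign_voices assign_voices_alt
  have hmem : ∀ p ∈ gs, p.2 ∈ pvFour := by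
    intro p hp
    have := hpre p hp
    simp only [pvFour, List.mem_cons, List.not_mem_nil, or_false]
    tauto
  have hinv : pvInv nv (PySem.Dict.ofList [("man", (0 : Int)), ("woman", 0), ("boy", 0), ("girl", 0)])
      (PySem.Dict.ofList ((pvPoolsB nv).keys.map (fun g => (g, ([] : List String))))) := by
    rw [pvPoolsB_keys]
    intro g hg
    refine ⟨0, (pvPool nv g).length, ?_, ?_, le_refl _, by simp⟩
    · simp only [pvFour, List.mem_cons, List.not_mem_nil, or_false] at hg
      rcases hg with h | h | h | h <;> subst h <;> rfl
    · simp only [pvFour, List.mem_cons, List.not_mem_nil, or_false] at hg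
      rw [List.drop_length]
      rcases hg with h | h | h | h <;> subst h <;> rfl
  exact congrArg PySem.Dict.items (pv_fold_eq nv gs _ _ _ hmem hinv)
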